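-- pv_equiv track=rewrite | github.com/BuilderBenv1/brain-v | scripts/run_reconciled_rerun.py | reconciled_suffix_dealer_mean
-- ===== SOURCE A (Python) =====
-- CORE_SET = {"t", "p", "k", "f", "cth", "cph", "ckh", "cfh"}
--
-- MANTLE_SET = {"ch", "sh", "ee"}
--
-- DEALERS = {"d", "l", "r", "s", "n", "x", "i", "m", "g"}
--
-- NON_STANDARD = {"b", "c", "j", "u", "v", "z"}
--
-- def passes_filters(t):
--     if not t:
--         return False
--     if t[0] == "q":
--         return False
--     if any(g in NON_STANDARD for g in t):
--         return False
--     return True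
--
-- def strict_layer_suffix(t, first_core_idx):
--     out = []
--     for g in t[first_core_idx + 1:]:
--         if g in MANTLE_SET:
--             break
--         out.append(g)
--     return out
--
-- def reconciled_suffix_dealer_mean(tokens):
--     counts = []
--     for t in tokens:
--         if not passes_filters(t):
--             continue
--         core_positions = [i for i, g in enumerate(t) if g in CORE_SET]
--         if not core_positions:
--             continue
--         suffix = strict_layer_suffix(t, core_positions[0])
--         counts.append(sum(1 for g in suffix if g in DEALERS))
--     return counts
-- ===== SOURCE B (Python) =====
-- CORE_SET = {"t", "p", "k", "f", "cth", "cph", "ckh", "cfh"}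
--
-- MANTLE_SET = {"ch", "sh", "ee"}
--
-- DEALERS = {"d", "l", "r", "s", "n", "x", "i", "m", "g"}
--
-- NON_STANDARD = {"b", "c", "j", "u", "v", "z"}
--
--
-- def reconciled_suffix_dealer_mean(tokens):
--     # One fused pass per token: a small state machine replaces the separate
--     # filter pass, enumerate/filter position pass and suffix-slice pass of
--     # the original.
--     counts = []
--     for t in tokens:
--         if not t or t[0] == "q":
--             continue
--         rejected = False
--         found_core = False
--         counting = False
--         c = 0
--         for g in t:
--             if g in NON_STANDARD:
--                 rejected = True
--                 break
--             if not found_core: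
--                 if g in CORE_SET:
--                     found_core = True
--                     counting = True
--             elif counting:
--                 if g in MANTLE_SET:
--                     counting = False
--                 elif g in DEALERS:
--                     c += 1
--         if not rejected and found_core:
--             counts.append(c)
--     return counts
-- ===== Notes on version B (the rewrite author's own statement) =====
-- stated objective: alternative
-- what changed: Replaces A's three separate passes per token (NON_STANDARD filter, enumerate/filter core-position list, slice-then-break suffix scan) with one fused left-to-right state machine per token carrying found_core/counting flags and a dealer counter.
import Mathlib
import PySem

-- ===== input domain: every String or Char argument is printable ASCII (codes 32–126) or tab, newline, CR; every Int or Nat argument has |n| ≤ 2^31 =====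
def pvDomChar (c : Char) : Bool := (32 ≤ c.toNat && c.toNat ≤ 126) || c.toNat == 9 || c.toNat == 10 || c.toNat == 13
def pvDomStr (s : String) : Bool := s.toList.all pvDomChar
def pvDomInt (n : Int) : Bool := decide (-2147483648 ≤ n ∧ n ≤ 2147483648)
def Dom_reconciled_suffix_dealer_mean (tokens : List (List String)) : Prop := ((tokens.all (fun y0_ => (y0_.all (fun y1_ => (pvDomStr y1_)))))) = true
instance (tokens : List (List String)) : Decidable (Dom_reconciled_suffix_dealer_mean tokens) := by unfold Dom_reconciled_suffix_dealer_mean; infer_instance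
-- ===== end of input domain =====

-- B fuses A's three per-token passes into one state machine; same values, alternative structure.

-- module-level grapheme sets shared by both versions
def coreB (g : String) : Bool := g ∈ ["t", "p", "k", "f", "cth", "cph", "ckh", "cfh"]
def mantleB (g : String) : Bool := g ∈ ["ch", "sh", "ee"]
def dealerB (g : String) : Bool := g ∈ ["d", "l", "r", "s", "n", "x", "i", "m", "g"]
def nonStdB (g : String) : Bool := g ∈ ["b", "c", "j", "u", "v", "z"]

-- ===== PORT A =====
def passes_filters (t : List String) : Bool :=
  match t with
  | [] => false
  | g0 :: rest =>
    if g0 == "q" then false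
    else if (g0 :: rest).any (fun g => nonStdB g) then false
    else true

def strict_layer_suffix (t : List String) (first_core_idx : Int) : List String :=
  -- the loop with `break` on a mantle grapheme over t[first_core_idx+1:] is a takeWhile
  (PySem.List.slice t (some (first_core_idx + 1)) none).takeWhile (fun g => !mantleB g)

def aStep (counts : List Int) (t : List String) : List Int :=
  if !passes_filters t then counts
  else
    match ((PySem.List.enumerate t 0).filter (fun p => coreB p.2)).map (·.1) with
    | [] => counts
    | i :: _ => counts ++ [((strict_layer_suffix t i).countP (fun g => dealerB g) : Int)]

def reconciled_suffix_dealer_mean (tokens : List (List String)) : List Int :=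
  tokens.foldl aStep []

-- ===== PORT B =====
def scanTok : List String → Bool → Bool → Int → Option Int
  | [], found_core, _, c => if found_core then some c else none
  | g :: rest, found_core, counting, c =>
    if nonStdB g then none          -- rejected: break
    else if !found_core then
      if coreB g then scanTok rest true true c else scanTok rest false false c
    else if counting then
      if mantleB g then scanTok rest true false c
      else if dealerB g then scanTok rest true true (c + 1)
      else scanTok rest true true c
    else scanTok rest true false c

def bStep (t : List String) (acc : List Int) : List Int :=
  match t with
  | [] => acc
  | g0 :: _ =>
    if g0 == "q" then acc
    else
      match scanTok t false false 0 with
      | none => acc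
      | some c => c :: acc

def reconciled_suffix_dealer_mean_alt (tokens : List (List String)) : List Int :=
  tokens.foldr bStep []

-- ===== PRECONDITION & SPEC =====
def Spec_reconciled_suffix_dealer_mean (tokens : List (List String)) (out : List Int) : Prop := out = reconciled_suffix_dealer_mean_alt tokens
instance (tokens : List (List String)) (out : List Int) : Decidable (Spec_reconciled_suffix_dealer_mean tokens out) := by unfold Spec_reconciled_suffix_dealer_mean; infer_instance

-- ===== CLAIM (what is proved, stated in full; the proofs are below) =====
def Claim_equal_reconciled_suffix_dealer_mean : Prop := ∀ (tokens : List (List String)), Dom_reconciled_suffix_dealer_mean tokens → Spec_reconciled_suffix_dealer_mean tokens (reconciled_suffix_dealer_mean tokens)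

-- ===== LEMMAS AND PROOFS =====

-- rest of the token after the first CORE_SET grapheme, if any
def firstCoreRest : List String → Option (List String)
  | [] => none
  | g :: r => if coreB g then some r else firstCoreRest r

-- index of the first CORE_SET grapheme, if any
def firstCoreIdx : List String → Option Nat
  | [] => none
  | g :: r => if coreB g then some 0 else (firstCoreIdx r).map (· + 1)

theorem scan_none (t : List String) (fc cnt : Bool) (c : Int)
    (h : t.any (fun g => nonStdB g) = true) : scanTok t fc cnt c = none := by
  induction t generalizing fc cnt c with
  | nil => simp at h
  | cons g r ih =>
    simp only [List.any_cons, Bool.or_eq_true] at h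
    by_cases hg : nonStdB g = true
    · simp [scanTok, hg]
    · have hr : r.any (fun g => nonStdB g) = true := by tauto
      simp only [scanTok, hg]
      split_ifs <;> first | rfl | exact ih _ _ _ hr

theorem scan_done (t : List String) (c : Int)
    (h : t.any (fun g => nonStdB g) = false) : scanTok t true false c = some c := by
  induction t generalizing c with
  | nil => simp [scanTok]
  | cons g r ih =>
    simp only [List.any_cons, Bool.or_eq_false_iff] at h
    simp [scanTok, h.1, ih c h.2]

theorem scan_count (t : List String) (c : Int)
    (h : t.any (fun g => nonStdB g) = false) :
    scanTok t true true c
      = some (c + ((t.takeWhile (fun g => !mantleB g)).countP (fun g => dealerB g) : Int)) := by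
  induction t generalizing c with
  | nil => simp [scanTok]
  | cons g r ih =>
    simp only [List.any_cons, Bool.or_eq_false_iff] at h
    by_cases hm : mantleB g = true
    · simp [scanTok, h.1, hm, scan_done r c h.2]
    · have hm' : mantleB g = false := by simp_all
      by_cases hd : dealerB g = true
      · rw [show scanTok (g :: r) true true c = scanTok r true true (c + 1) by
            simp [scanTok, h.1, hm', hd]]
        rw [ih (c + 1) h.2]
        simp only [List.takeWhile_cons, hm', Bool.not_false, if_true, List.countP_cons, hd]
        congr 1
        push_cast
        ring
      · have hd' : dealerB g = false := by simp_all
        rw [show scanTok (g :: r) true true c = scanTok r true true c by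
            simp [scanTok, h.1, hm', hd']]
        rw [ih c h.2]
        simp [hm', hd']

theorem scan_seek (t : List String) (c : Int)
    (h : t.any (fun g => nonStdB g) = false) :
    scanTok t false false c
      = match firstCoreRest t with
        | none => none
        | some r => some (c + ((r.takeWhile (fun g => !mantleB g)).countP (fun g => dealerB g) : Int)) := by
  induction t generalizing c with
  | nil => simp [scanTok, firstCoreRest]
  | cons g r ih =>
    simp only [List.any_cons, Bool.or_eq_false_iff] at h
    by_cases hc : coreB g = true
    · simp [scanTok, h.1, hc, firstCoreRest, scan_count r c h.2]
    · have hc' : coreB g = false := by simp_all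
      simp [scanTok, h.1, hc', firstCoreRest, ih c h.2]

theorem enum_core (t : List String) (s : Nat) :
    ((((PySem.List.enumerate t (s : Int)).filter (fun p => coreB p.2)).map (·.1))).head?
      = (firstCoreIdx t).map (fun k => ((s + k : Nat) : Int)) := by
  induction t generalizing s with
  | nil => simp [PySem.List.enumerate_nil, firstCoreIdx]
  | cons g r ih =>
    rw [PySem.List.enumerate_cons]
    by_cases hc : coreB g = true
    · simp [hc, firstCoreIdx]
    · have hc' : coreB g = false := by simp_all
      simp only [List.filter_cons, hc', Bool.false_eq_true, if_false, firstCoreIdx]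
      have h1 : ((s : Int) + 1) = ((s + 1 : Nat) : Int) := by push_cast; ring
      rw [h1, ih (s + 1)]
      cases hfi : firstCoreIdx r
      · simp
      · simp
        omega

theorem idx_rest (t : List String) :
    firstCoreRest t = (firstCoreIdx t).map (fun k => t.drop (k + 1)) := by
  induction t with
  | nil => simp [firstCoreRest, firstCoreIdx]
  | cons g r ih =>
    by_cases hc : coreB g = true
    · simp [firstCoreRest, firstCoreIdx, hc]
    · have hc' : coreB g = false := by simp_all
      simp only [firstCoreRest, firstCoreIdx, hc', Bool.false_eq_true, if_false, ih,
        Option.map_map]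
      cases firstCoreIdx r <;> rfl

-- A's per-token contribution, as an option
def aOpt (t : List String) : Option Int :=
  if !passes_filters t then none
  else
    match ((PySem.List.enumerate t 0).filter (fun p => coreB p.2)).map (·.1) with
    | [] => none
    | i :: _ => some ((strict_layer_suffix t i).countP (fun g => dealerB g) : Int)

-- B's per-token contribution, as an option
def bOpt (t : List String) : Option Int :=
  match t with
  | [] => none
  | g0 :: _ => if g0 == "q" then none else scanTok t false false 0

theorem per_token (t : List String) : aOpt t = bOpt t := by
  cases t with
  | nil => simp [aOpt, bOpt, passes_filters]
  | cons g0 rest =>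
    by_cases hq : (g0 == "q") = true
    · simp [aOpt, bOpt, passes_filters, hq]
    · have hq' : (g0 == "q") = false := by simp_all
      by_cases hns : (g0 :: rest).any (fun g => nonStdB g) = true
      · have hpf : passes_filters (g0 :: rest) = false := by
          simp [passes_filters, hq', hns]
        simp [aOpt, bOpt, hpf, hq', scan_none _ _ _ _ hns]
      · have hns' : (g0 :: rest).any (fun g => nonStdB g) = false := by simp_all
        have hp : passes_filters (g0 :: rest) = true := by
          simp [passes_filters, hq', hns']
        have hmatch :
            (((PySem.List.enumerate (g0 :: rest) 0).filter (fun p => coreB p.2)).map (·.1)).head?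
              = (firstCoreIdx (g0 :: rest)).map (fun k => ((k : Nat) : Int)) := by
          simpa using enum_core (g0 :: rest) 0
        have hseek := scan_seek (g0 :: rest) 0 hns'
        rw [idx_rest] at hseek
        simp only [aOpt, bOpt, hp, Bool.not_true, Bool.false_eq_true, if_false, hq']
        rw [hseek]
        cases hL : ((PySem.List.enumerate (g0 :: rest) 0).filter (fun p => coreB p.2)).map (·.1) with
        | nil =>
          rw [hL] at hmatch
          simp only [List.head?_nil] at hmatch
          cases hfi : firstCoreIdx (g0 :: rest) with
          | none => simp
          | some k => rw [hfi] at hmatch; simp at hmatch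
        | cons i l =>
          rw [hL] at hmatch
          simp only [List.head?_cons] at hmatch
          cases hfi : firstCoreIdx (g0 :: rest) with
          | none => rw [hfi] at hmatch; simp at hmatch
          | some k =>
            rw [hfi] at hmatch
            simp only [Option.map_some] at hmatch
            replace hmatch : i = ((k : Nat) : Int) := by exact Option.some.inj hmatch
            simp only [Option.map_some]
            have hslice : strict_layer_suffix (g0 :: rest) i
                = ((g0 :: rest).drop (k + 1)).takeWhile (fun g => !mantleB g) := by
              unfold strict_layer_suffix
              rw [hmatch]
              have h1 : ((k : Nat) : Int) + 1 = ((k + 1 : Nat) : Int) := by push_cast; ring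
              rw [h1, PySem.List.slice_from_natCast]
            rw [hslice]
            simp

theorem aStep_eq (acc : List Int) (t : List String) :
    aStep acc t = acc ++ (aOpt t).toList := by
  unfold aStep aOpt
  split_ifs with h
  · simp
  · cases hm : ((PySem.List.enumerate t 0).filter (fun p => coreB p.2)).map (·.1) <;> simp

theorem bStep_eq (t : List String) (l : List Int) :
    bStep t l = (bOpt t).toList ++ l := by
  cases t with
  | nil => rfl
  | cons g0 rest =>
    by_cases h : (g0 == "q") = true
    · simp [bStep, bOpt, h]
    · cases hs : scanTok (g0 :: rest) false false 0 <;> simp [bStep, bOpt, h, hs]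

theorem foldA (tokens : List (List String)) (acc : List Int) :
    tokens.foldl aStep acc = acc ++ reconciled_suffix_dealer_mean_alt tokens := by
  induction tokens generalizing acc with
  | nil => simp [reconciled_suffix_dealer_mean_alt]
  | cons t ts ih =>
    rw [List.foldl_cons, ih]
    show aStep acc t ++ _ = acc ++ (t :: ts).foldr bStep []
    rw [List.foldr_cons, bStep_eq, aStep_eq, per_token]
    simp [reconciled_suffix_dealer_mean_alt]

-- ===== VERDICT (by name: the statement is the Claim_ definition above) =====
theorem reconciled_suffix_dealer_mean_spec : Claim_equal_reconciled_suffix_dealer_mean := by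
  intro tokens _
  show reconciled_suffix_dealer_mean tokens = reconciled_suffix_dealer_mean_alt tokens
  unfold reconciled_suffix_dealer_mean
  rw [foldA]
  simp
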